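-- pv_equiv track=rewrite | github.com/DazKins/HangmanAI | main.py | filter_and_update_word_freq_list
-- ===== SOURCE A (Python) =====
-- def matches_pattern(guess, word, pattern):
--   for c in reversed(word):
--     pattern_bit = pattern & 1
--     if pattern_bit == 1 and c != guess:
--       return False
--     if pattern_bit == 0 and c == guess:
--       return False
--     pattern >>= 1
--   return True
--
-- def filter_and_update_word_freq_list(guess, pattern, words_freq, length):
--   filtered_words_freq = []
--   for word_freq in words_freq:
--     if not matches_pattern(guess, word_freq[0], pattern):
--       continue
--
--     if not len(word_freq[0]) == length:
--       continue
--
--     filtered_words_freq.append([ word_freq[0].replace(guess, ""), word_freq[1] ])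
--   return filtered_words_freq
-- ===== SOURCE B (Python) =====
-- def filter_and_update_word_freq_list(guess, pattern, words_freq, length):
--   out = []
--   for word_freq in words_freq:
--     word = word_freq[0]
--     if len(word) != length:
--       continue
--     # build the word's own bitmask (bit i = 1 iff the i-th-from-last char equals guess)
--     wmask = 0
--     bit = 1
--     for c in reversed(word):
--       if c == guess:
--         wmask += bit
--       bit *= 2
--     # A ignores pattern bits beyond len(word): compare against pattern mod 2**len(word)
--     if wmask == pattern % bit:
--       out.append([word.replace(guess, ""), word_freq[1]])
--   return out
-- ===== Notes on version B (the rewrite author's own statement) =====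
-- stated objective: alternative
-- what changed: matches_pattern's per-character branch-and-shift short-circuit test is replaced by a value computation: one pass over reversed(word) builds the word's own bitmask (and 2**len(word)), and matching is a single comparison wmask == pattern % 2**len(word); the length check moves first so non-matching-length words are never scanned.
import Mathlib
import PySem

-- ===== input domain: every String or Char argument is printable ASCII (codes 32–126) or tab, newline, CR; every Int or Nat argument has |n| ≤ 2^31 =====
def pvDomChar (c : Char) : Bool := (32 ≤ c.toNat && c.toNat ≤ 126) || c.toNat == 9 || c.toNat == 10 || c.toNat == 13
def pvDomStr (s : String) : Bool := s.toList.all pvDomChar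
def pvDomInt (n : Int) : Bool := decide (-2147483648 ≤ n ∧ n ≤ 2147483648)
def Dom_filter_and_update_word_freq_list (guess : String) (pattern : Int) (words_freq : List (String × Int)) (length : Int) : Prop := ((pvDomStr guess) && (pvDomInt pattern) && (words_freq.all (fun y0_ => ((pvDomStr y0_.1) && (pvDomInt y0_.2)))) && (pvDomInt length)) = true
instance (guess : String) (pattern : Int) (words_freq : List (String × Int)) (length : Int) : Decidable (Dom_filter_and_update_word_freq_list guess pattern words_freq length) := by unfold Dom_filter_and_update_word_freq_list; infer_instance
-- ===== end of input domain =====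

-- B replaces A's per-character branch-and-shift pattern check by building the word's own
-- bitmask in one pass and comparing it once against pattern mod 2^len(word) (objective:
-- alternative decomposition, same cost).

-- shared elementary comparison: Python's  c == guess  for a 1-char string c
def pvChEq (guess : String) (c : Char) : Bool := String.ofList [c] == guess

-- ===== PORT A =====
-- matches_pattern's loop over reversed(word)
def pvMatchGo (guess : String) : List Char → Int → Bool
  | [], _ => true
  | c :: rest, p =>
    let pattern_bit := PySem.Int.band p 1
    if pattern_bit == 1 && !(pvChEq guess c) then false
    else if pattern_bit == 0 && pvChEq guess c then false
    else pvMatchGo guess rest (p >>> (1:Nat))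

def matches_pattern (guess : String) (word : String) (pattern : Int) : Bool :=
  pvMatchGo guess word.toList.reverse pattern

def filter_and_update_word_freq_list (guess : String) (pattern : Int) (words_freq : List (String × Int)) (length : Int) : List (String × Int) :=
  words_freq.foldl (fun filtered_words_freq word_freq =>
    if !(matches_pattern guess word_freq.1 pattern) then filtered_words_freq
    else if !(PySem.Str.len word_freq.1 == length) then filtered_words_freq
    else filtered_words_freq ++ [(PySem.Str.replace word_freq.1 guess "", word_freq.2)]) []

-- ===== PORT B =====
-- one pass over reversed(word): accumulate (wmask, bit)
def pvMaskStep (guess : String) (st : Int × Int) (c : Char) : Int × Int :=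
  ((if pvChEq guess c then st.1 + st.2 else st.1), st.2 * 2)

def filter_and_update_word_freq_list_alt (guess : String) (pattern : Int) (words_freq : List (String × Int)) (length : Int) : List (String × Int) :=
  words_freq.foldl (fun out word_freq =>
    if PySem.Str.len word_freq.1 == length then
      let st := word_freq.1.toList.reverse.foldl (pvMaskStep guess) (0, 1)
      if st.1 == PySem.Int.mod pattern st.2 then
        out ++ [(PySem.Str.replace word_freq.1 guess "", word_freq.2)]
      else out
    else out) []

-- ===== PRECONDITION & SPEC =====
def Spec_filter_and_update_word_freq_list (guess : String) (pattern : Int) (words_freq : List (String × Int)) (length : Int) (out : List (String × Int)) : Prop := out = filter_and_update_word_freq_list_alt guess pattern words_freq length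
instance (guess : String) (pattern : Int) (words_freq : List (String × Int)) (length : Int) (out : List (String × Int)) : Decidable (Spec_filter_and_update_word_freq_list guess pattern words_freq length out) := by unfold Spec_filter_and_update_word_freq_list; infer_instance

-- ===== CLAIM (what is proved, stated in full; the proofs are below) =====
def Claim_equal_filter_and_update_word_freq_list : Prop := ∀ (guess : String) (pattern : Int) (words_freq : List (String × Int)) (length : Int), Dom_filter_and_update_word_freq_list guess pattern words_freq length → Spec_filter_and_update_word_freq_list guess pattern words_freq length (filter_and_update_word_freq_list guess pattern words_freq length)

-- ===== LEMMAS AND PROOFS =====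

-- the word's mask, recursively (bit 0 = first char of the reversed word)
def pvM (guess : String) : List Char → Int
  | [] => 0
  | c :: r => (if pvChEq guess c then 1 else 0) + 2 * pvM guess r

theorem pvM_bounds (guess : String) (cs : List Char) :
    0 ≤ pvM guess cs ∧ pvM guess cs < 2 ^ cs.length := by
  induction cs with
  | nil => simp [pvM]
  | cons c r ih =>
    simp only [pvM, List.length_cons, pow_succ]
    split <;> omega

theorem pvMaskStep_foldl (guess : String) (cs : List Char) :
    ∀ w b : Int, cs.foldl (pvMaskStep guess) (w, b) = (w + b * pvM guess cs, b * 2 ^ cs.length) := by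
  induction cs with
  | nil => intro w b; simp [pvM]
  | cons c r ih =>
    intro w b
    simp only [List.foldl_cons, pvMaskStep, pvM, List.length_cons, pow_succ]
    split <;> rw [ih] <;> ring_nf

theorem pvShiftRight_one (p : Int) : p >>> (1:Nat) = PySem.Int.floordiv p 2 := by
  rw [PySem.Int.floordiv_eq_ediv_of_pos (by norm_num)]
  simp [Int.shiftRight_eq_div_pow]

theorem pvMod_decomp (p : Int) (n : Nat) :
    PySem.Int.mod p (2 ^ (n + 1)) =
      PySem.Int.mod p 2 + 2 * PySem.Int.mod (PySem.Int.floordiv p 2) (2 ^ n) := by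
  have hk : (0:Int) < 2 ^ n := by positivity
  rw [PySem.Int.mod_eq_emod_of_pos (by positivity),
      PySem.Int.mod_eq_emod_of_pos (by norm_num),
      PySem.Int.mod_eq_emod_of_pos hk,
      PySem.Int.floordiv_eq_ediv_of_pos (by norm_num)]
  have h2 : p % 2 + 2 * (p / 2 % 2 ^ n) + 2 ^ (n+1) * (p / 2 / 2 ^ n) = p := by
    have e1 := Int.ediv_add_emod p 2
    have e2 := Int.ediv_add_emod (p / 2) (2 ^ n)
    have : (2:Int) ^ (n+1) = 2 * 2 ^ n := by ring
    rw [this]; nlinarith [e1, e2]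
  have hb1 : 0 ≤ p % 2 := Int.emod_nonneg p (by norm_num)
  have hb2 : p % 2 < 2 := Int.emod_lt_of_pos p (by norm_num)
  have hb3 : 0 ≤ p / 2 % 2 ^ n := Int.emod_nonneg _ (by positivity)
  have hb4 : p / 2 % 2 ^ n < 2 ^ n := Int.emod_lt_of_pos _ hk
  have := (Int.ediv_emod_unique (a := p) (b := 2 ^ (n+1))
      (r := p % 2 + 2 * (p / 2 % 2 ^ n)) (q := p / 2 / 2 ^ n) (by positivity)).mpr
      ⟨by linarith [h2], by omega, by rw [pow_succ]; omega⟩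
  exact this.2

theorem pvMatchGo_eq_mask (guess : String) (cs : List Char) :
    ∀ p : Int, pvMatchGo guess cs p =
      (pvM guess cs == PySem.Int.mod p (2 ^ cs.length)) := by
  induction cs with
  | nil =>
    intro p
    simp [pvMatchGo, pvM]
  | cons c r ih =>
    intro p
    have hr0 : 0 ≤ PySem.Int.mod p 2 := PySem.Int.mod_nonneg p (by norm_num)
    have hr2 : PySem.Int.mod p 2 < 2 := PySem.Int.mod_lt p (by norm_num)
    have hS0 : 0 ≤ PySem.Int.mod (PySem.Int.floordiv p 2) (2 ^ r.length) :=
      PySem.Int.mod_nonneg _ (by positivity)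
    have hSlt : PySem.Int.mod (PySem.Int.floordiv p 2) (2 ^ r.length) < 2 ^ r.length :=
      PySem.Int.mod_lt _ (by positivity)
    have hM := pvM_bounds guess r
    have hcase : PySem.Int.mod p 2 = 0 ∨ PySem.Int.mod p 2 = 1 := by omega
    by_cases hc : pvChEq guess c = true <;> rcases hcase with h | h <;>
      simp only [pvMatchGo, PySem.Int.band_one, pvShiftRight_one, ih, pvM,
        List.length_cons, pvMod_decomp, h, hc] <;>
      simp <;> omega

theorem pvPerWord (guess : String) (w : String) (p : Int) :
    matches_pattern guess w p =
      ((w.toList.reverse.foldl (pvMaskStep guess) (0, 1)).1 ==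
        PySem.Int.mod p (w.toList.reverse.foldl (pvMaskStep guess) (0, 1)).2) := by
  rw [matches_pattern, pvMatchGo_eq_mask, pvMaskStep_foldl guess _ 0 1]
  simp

-- ===== VERDICT (by name: the statement is the Claim_ definition above) =====
theorem filter_and_update_word_freq_list_spec : Claim_equal_filter_and_update_word_freq_list := by
  intro guess pattern words_freq length _
  unfold Spec_filter_and_update_word_freq_list
  unfold filter_and_update_word_freq_list filter_and_update_word_freq_list_alt
  apply List.foldl_ext
  intro acc wf _
  rw [pvPerWord]
  rcases Bool.eq_false_or_eq_true (PySem.Str.len wf.1 == length) with hl | hl <;>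
    rcases Bool.eq_false_or_eq_true ((wf.1.toList.reverse.foldl (pvMaskStep guess) (0, 1)).1 ==
      PySem.Int.mod pattern (wf.1.toList.reverse.foldl (pvMaskStep guess) (0, 1)).2) with hm | hm <;>
    rw [hl] <;> simp only [List.foldl_reverse] at hm <;> simp [hm]
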